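-- pv_equiv track=rewrite | github.com/sungminoh/algorithms | leetcode/solved/763_Special_Binary_String/solution.py | makeLargestSpecial
-- ===== SOURCE A (Python) =====
-- from collections import defaultdict
--
-- def makeLargestSpecial(s: str) -> str:
--     """Apr 13, 2024 18:21"""
--
--     N = len(s)
--
--     visited = set()
--     def rec(s):
--         visited.add(s)
--         specials = defaultdict(list)
--         acc = 0
--         for i in range(N):
--             acc = 0
--             for j in range(i, N):
--                 acc += 1 if s[j] == '1' else -1
--                 if acc == 0:
--                     specials[i].append(j+1)
--                     break
--                 elif acc < 0:
--                     break
--         ret = s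
--         for i in specials:
--             for j in specials.get(i, []):
--                 for k in specials.get(j, []):
--                     if not s[j:k].startswith(s[i:j]) and s[i:j] < s[j:k]:
--                         _s = s[:i] + s[j:k] + s[i:j] + s[k:]
--                         if _s not in visited:
--                             ret = max(ret, rec(_s))
--         return ret
--
--     return rec(s)
-- ===== SOURCE B (Python) =====
-- def makeLargestSpecial(s: str) -> str:
--     n = len(s)
--
--     def match_end(u, i):
--         # first m > i with the '1'/'0' balance of u[i:m] zero, scanning left to
--         # right and giving up as soon as the balance goes negative
--         acc = 0
--         for j in range(i, n):
--             acc += 1 if u[j] == '1' else -1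
--             if acc == 0:
--                 return j + 1
--             if acc < 0:
--                 return None
--         return None
--
--     def neighbors(u):
--         out = []
--         for i in range(n):
--             j = match_end(u, i)
--             if j is None:
--                 continue
--             k = match_end(u, j)
--             if k is None:
--                 continue
--             if not u[j:k].startswith(u[i:j]) and u[i:j] < u[j:k]:
--                 out.append(u[:i] + u[j:k] + u[i:j] + u[k:])
--         return out
--
--     seen = set()
--     stack = [s]
--     while stack:
--         u = stack.pop(0)
--         if u in seen:
--             continue
--         seen.add(u)
--         stack = neighbors(u) + stack
--     return max(seen)
-- ===== Notes on version B (the rewrite author's own statement) =====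
-- stated objective: alternative
-- what changed: A's recursive DFS with a shared memo set, which threads a running maximum through nested recursive calls and precomputes a per-index dictionary of special-substring endpoints, is replaced by an iterative explicit-stack worklist that only collects the set of reachable strings (computing each matched endpoint on demand with a small scanning helper) and takes the lexicographic maximum of that set once at the end.
import Mathlib
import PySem

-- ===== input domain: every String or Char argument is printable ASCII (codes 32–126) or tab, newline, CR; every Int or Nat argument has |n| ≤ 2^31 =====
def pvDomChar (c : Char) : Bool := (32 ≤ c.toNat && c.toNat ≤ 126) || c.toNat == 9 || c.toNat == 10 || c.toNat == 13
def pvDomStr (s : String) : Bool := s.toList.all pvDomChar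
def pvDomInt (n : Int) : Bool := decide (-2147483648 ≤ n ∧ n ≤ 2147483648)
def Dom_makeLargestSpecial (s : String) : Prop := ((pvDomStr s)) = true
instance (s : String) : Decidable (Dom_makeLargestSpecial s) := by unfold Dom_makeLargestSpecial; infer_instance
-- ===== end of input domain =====

-- B replaces A's recursive DFS (which threads a running maximum through nested
-- recursive calls over a memo set) by an iterative explicit-stack worklist that
-- collects the visited set and takes its maximum once at the end; objective:
-- alternative (same asymptotic cost).

-- Python's built-in max on two strings (shared primitive, used by both sources' `max`)
def pyStrMax (a b : List Char) : List Char := if PySem.Chars.strLt a b then b else a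

-- acc += 1 if s[j] == '1' else -1   (the update both sources perform)
def scanDelta (u : List Char) (j : Int) : Int :=
  if PySem.List.pyGetD u j ' ' == '1' then 1 else -1

-- ===== PORT A =====
-- the inner `for j in range(i, N)` loop of rec: returns `some (j+1)` at the
-- first j where acc hits 0, none on going negative or exhausting the range
def scanA (u : List Char) (N : Int) (j : Int) (acc : Int) : Option Int :=
  if j < N then
    if acc + scanDelta u j = 0 then some (j + 1)
    else if acc + scanDelta u j < 0 then none
    else scanA u N (j + 1) (acc + scanDelta u j)
  else none
termination_by (N - j).toNat
decreasing_by omega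

-- the `specials` defaultdict of rec
def specialsA (u : List Char) (N : Int) : PySem.Dict Int (List Int) :=
  (PySem.List.pyRange 0 N 1).foldl (fun d i =>
    match scanA u N i 0 with
    | some m => d.modify i [] (fun l => l ++ [m])
    | none => d) PySem.Dict.empty

-- the candidate strings `_s` generated by rec's triple loop, in order
def nbrsA (u : List Char) (N : Int) : List (List Char) :=
  let sp := specialsA u N
  sp.items.foldl (fun acc p =>
    p.2.foldl (fun acc j =>
      (sp.getD j []).foldl (fun acc k =>
        if !(PySem.Chars.startswith (PySem.List.slice u (some j) (some k)) (PySem.List.slice u (some p.1) (some j)))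
            && PySem.Chars.strLt (PySem.List.slice u (some p.1) (some j)) (PySem.List.slice u (some j) (some k))
        then acc ++ [PySem.List.slice u none (some p.1) ++ PySem.List.slice u (some j) (some k)
                      ++ PySem.List.slice u (some p.1) (some j) ++ PySem.List.slice u (some k) none]
        else acc) acc) acc) []

-- rec, with a fuel guard for totality only (rec always terminates in Python:
-- the visited set grows with every call and stays inside the finitely many
-- rearrangements of s).  Both functions return the unspent fuel as data.
mutual
def recA (N : Int) (fuel : Nat) (V : PySem.Set (List Char)) (u : List Char) :
    Nat × PySem.Set (List Char) × List Char :=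
  match fuel with
  | 0 => (0, PySem.Set.add V u, u)
  | f + 1 => goA N f (PySem.Set.add V u) u (nbrsA u N)
termination_by fuel
decreasing_by omega

def goA (N : Int) (fuel : Nat) (V : PySem.Set (List Char)) (r : List Char)
    (ts : List (List Char)) : Nat × PySem.Set (List Char) × List Char :=
  match ts with
  | [] => (fuel, V, r)
  | t :: ts =>
    match fuel with
    | 0 => (0, V, r)
    | f + 1 =>
      if PySem.Set.contains V t then goA N f V r ts
      else
        match recA N f V t with
        | (g1, V1, r1) => goA N (min g1 f) V1 (pyStrMax r r1) ts
termination_by fuel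
decreasing_by all_goals omega
end

def makeLargestSpecial (s : String) : String :=
  let N : Int := PySem.Str.len s
  let fuel : Nat := (Nat.factorial s.toList.length + 1) * (s.toList.length + 2)
  String.ofList (recA N fuel PySem.Set.empty s.toList).2.2

-- ===== PORT B =====
-- match_end of Source B
def scanB (u : List Char) (N : Int) (j : Int) (acc : Int) : Option Int :=
  if j < N then
    if acc + scanDelta u j = 0 then some (j + 1)
    else if acc + scanDelta u j < 0 then none
    else scanB u N (j + 1) (acc + scanDelta u j)
  else none
termination_by (N - j).toNat
decreasing_by omega

-- neighbors of Source B
def nbrsB (u : List Char) (N : Int) : List (List Char) :=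
  (PySem.List.pyRange 0 N 1).foldl (fun acc i =>
    match scanB u N i 0 with
    | none => acc
    | some j =>
      match scanB u N j 0 with
      | none => acc
      | some k =>
        if !(PySem.Chars.startswith (PySem.List.slice u (some j) (some k)) (PySem.List.slice u (some i) (some j)))
            && PySem.Chars.strLt (PySem.List.slice u (some i) (some j)) (PySem.List.slice u (some j) (some k))
        then acc ++ [PySem.List.slice u none (some i) ++ PySem.List.slice u (some j) (some k)
                      ++ PySem.List.slice u (some i) (some j) ++ PySem.List.slice u (some k) none]
        else acc) []

-- the while-loop of Source B (fuel is a totality guard only, as in recA)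
def loopB (N : Int) (fuel : Nat) (V : PySem.Set (List Char)) (stack : List (List Char)) :
    PySem.Set (List Char) :=
  match fuel, stack with
  | _, [] => V
  | 0, _ :: _ => V
  | f + 1, t :: rest =>
    if PySem.Set.contains V t then loopB N f V rest
    else
      match f with
      | 0 => PySem.Set.add V t
      | f' + 1 => loopB N f' (PySem.Set.add V t) (nbrsB t N ++ rest)

def makeLargestSpecial_alt (s : String) : String :=
  let N : Int := PySem.Str.len s
  let fuel : Nat := (Nat.factorial s.toList.length + 1) * (s.toList.length + 2) + 1
  -- max(seen): seen is never empty (it contains s); the [] branch is unreachable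
  match loopB N fuel PySem.Set.empty [s.toList] with
  | [] => s
  | x :: t => String.ofList (t.foldl pyStrMax x)

-- ===== PRECONDITION & SPEC =====
def Spec_makeLargestSpecial (s : String) (out : String) : Prop := out = makeLargestSpecial_alt s
instance (s : String) (out : String) : Decidable (Spec_makeLargestSpecial s out) := by unfold Spec_makeLargestSpecial; infer_instance

-- ===== CLAIM (what is proved, stated in full; the proofs are below) =====
def Claim_equal_makeLargestSpecial : Prop := ∀ (s : String), Dom_makeLargestSpecial s → Spec_makeLargestSpecial s (makeLargestSpecial s)

-- ===== LEMMAS AND PROOFS =====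

lemma scanA_eq_scanB (u : List Char) (N j acc : Int) : scanA u N j acc = scanB u N j acc := by
  fun_induction scanA u N j acc <;> rw [scanB] <;> simp_all

lemma scanA_none_of_ge (u : List Char) {N j : Int} (acc : Int) (h : N ≤ j) :
    scanA u N j acc = none := by
  rw [scanA]; simp [not_lt.mpr h]

lemma scanA_some_lt {u : List Char} {N j acc m : Int} (h : scanA u N j acc = some m) :
    j < N := by
  by_contra hc
  rw [scanA_none_of_ge u acc (not_lt.mp hc)] at h
  simp at h

lemma scanA_some_bounds {u : List Char} {N j acc m : Int} (h : scanA u N j acc = some m) :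
    j < m ∧ m ≤ N := by
  fun_induction scanA u N j acc <;> simp_all <;> omega

-- characterization of the specials dict
lemma foldl_specials_items (u : List Char) (N : Int) :
    ∀ (L : List Int) (d : PySem.Dict Int (List Int)), L.Nodup →
      (∀ i ∈ L, d.contains i = false) →
      (L.foldl (fun d i =>
          match scanA u N i 0 with
          | some m => d.modify i [] (fun l => l ++ [m])
          | none => d) d).items
        = d.items ++ L.filterMap (fun i => (scanA u N i 0).map (fun m => (i, ([m] : List Int)))) := by
  intro L
  induction L with
  | nil => intro d _ _; simp
  | cons i L ih =>
    intro d hnd hdis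
    have hi : d.contains i = false := hdis i (by simp)
    cases h : scanA u N i 0 with
    | none =>
      have hstep : (match scanA u N i 0 with
          | some m => d.modify i [] (fun l => l ++ [m])
          | none => d) = d := by rw [h]
      rw [List.foldl_cons, hstep,
        ih d hnd.of_cons (fun i' hi' => hdis i' (List.mem_cons_of_mem _ hi'))]
      simp [h]
    | some m =>
      have hgd : d.getD i [] = [] := PySem.Dict.getD_of_not_contains d [] hi
      have hstep : (match scanA u N i 0 with
          | some m => d.modify i [] (fun l => l ++ [m])
          | none => d) = d.insert i [m] := by
        rw [h]; simp [PySem.Dict.modify, hgd]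
      rw [List.foldl_cons, hstep,
        ih (d.insert i [m]) hnd.of_cons
          (fun i' hi' => by
            rw [PySem.Dict.contains_insert]
            have hne : i' ≠ i := fun he => (List.nodup_cons.mp hnd).1 (he ▸ hi')
            simp [hne, hdis i' (List.mem_cons_of_mem _ hi')]),
        PySem.Dict.items_insert_of_not_contains d [m] hi]
      simp [h]

lemma items_specialsA (u : List Char) (N : Int) :
    (specialsA u N).items
      = (PySem.List.pyRange 0 N 1).filterMap
          (fun i => (scanA u N i 0).map (fun m => (i, ([m] : List Int)))) := by
  unfold specialsA
  rw [foldl_specials_items u N _ PySem.Dict.empty (PySem.List.nodup_pyRange_one 0 N)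
    (fun i _ => by simp [PySem.Dict.contains_empty])]
  simp [PySem.Dict.empty]

lemma keys_specialsA (u : List Char) (N : Int) :
    (specialsA u N).keys
      = (PySem.List.pyRange 0 N 1).filterMap
          (fun i => (scanA u N i 0).map (fun _ => i)) := by
  show (specialsA u N).items.map Prod.fst = _
  rw [items_specialsA, List.map_filterMap]
  congr 1
  funext i
  cases scanA u N i 0 <;> rfl

lemma keys_nodup_specialsA (u : List Char) (N : Int) : (specialsA u N).keys.Nodup := by
  rw [keys_specialsA]
  refine List.Nodup.filterMap ?_ (PySem.List.nodup_pyRange_one 0 N)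
  intro a a' b hb hb'
  cases ha : scanA u N a 0 <;> rw [ha] at hb <;> simp at hb
  cases ha' : scanA u N a' 0 <;> rw [ha'] at hb' <;> simp at hb'
  omega

lemma mem_keys_specialsA (u : List Char) (N : Int) (j : Int) :
    j ∈ (specialsA u N).keys ↔ (0 ≤ j ∧ j < N ∧ (scanA u N j 0).isSome) := by
  rw [keys_specialsA]
  simp only [List.mem_filterMap, Option.map_eq_some_iff]
  constructor
  · rintro ⟨a, ha, m, hm, rfl⟩
    have := PySem.List.mem_pyRange_one.mp ha
    exact ⟨this.1, this.2, by simp [hm]⟩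
  · rintro ⟨h0, hN, hs⟩
    obtain ⟨m, hm⟩ := Option.isSome_iff_exists.mp hs
    exact ⟨j, PySem.List.mem_pyRange_one.mpr ⟨h0, hN⟩, m, hm, rfl⟩

lemma getD_specialsA (u : List Char) (N : Int) {j : Int} (hj : 0 ≤ j) :
    (specialsA u N).getD j []
      = (match scanA u N j 0 with | some m => [m] | none => []) := by
  cases h : scanA u N j 0 with
  | none =>
    have : ¬ j ∈ (specialsA u N).keys := by
      rw [mem_keys_specialsA]; simp [h]
    refine PySem.Dict.getD_of_not_contains _ [] ?_
    have := (not_iff_not.mpr (PySem.Dict.contains_iff_mem_keys (specialsA u N) j)).mpr this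
    simpa using this
  | some m =>
    have hjN : j < N := scanA_some_lt h
    have hmem : (j, ([m] : List Int)) ∈ (specialsA u N).items := by
      rw [items_specialsA]
      exact List.mem_filterMap.mpr ⟨j, PySem.List.mem_pyRange_one.mpr ⟨hj, hjN⟩, by simp [h]⟩
    exact PySem.Dict.getD_of_mem_items _ hmem (keys_nodup_specialsA u N) []

lemma nbrsA_eq_nbrsB (u : List Char) (N : Int) : nbrsA u N = nbrsB u N := by
  simp only [nbrsA, nbrsB]
  rw [items_specialsA, List.foldl_filterMap]
  refine PySem.List.foldl_congr_mem _ _ _ _ ?_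
  intro acc i hi
  have hi0 : 0 ≤ i := (PySem.List.mem_pyRange_one.mp hi).1
  simp only [← scanA_eq_scanB]
  cases h : scanA u N i 0 with
  | none => simp
  | some m =>
    have h0m : 0 ≤ m := le_of_lt (lt_of_le_of_lt hi0 (scanA_some_bounds h).1)
    simp only [Option.map_some, List.foldl_cons, List.foldl_nil,
      getD_specialsA u N h0m]
    cases scanA u N m 0 <;> simp

-- pyStrMax is max of the linear order on List Char
lemma pyStrMax_eq_max (a b : List Char) : pyStrMax a b = max a b := by
  rcases lt_trichotomy a b with h|h|h <;> simp [pyStrMax, PySem.Chars.strLt, le_of_lt, h]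

lemma foldl_pyStrMax_swap (l : List (List Char)) (a b : List Char) :
    pyStrMax a (l.foldl pyStrMax b) = l.foldl pyStrMax (pyStrMax a b) := by
  induction l generalizing b with
  | nil => rfl
  | cons x xs ih =>
    simp only [List.foldl_cons]
    rw [ih, pyStrMax_eq_max, pyStrMax_eq_max, pyStrMax_eq_max, pyStrMax_eq_max, max_assoc]

-- unspent fuel never exceeds the fuel put in
lemma goA_zero (N : Int) (V : PySem.Set (List Char)) (r : List Char)
    (ts : List (List Char)) : goA N 0 V r ts = (0, V, r) := by
  cases ts <;> simp [goA]

lemma fuel_le (fuel : Nat) :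
    (∀ (N : Int) V u, (recA N fuel V u).1 ≤ fuel)
    ∧ (∀ (N : Int) V r ts, (goA N fuel V r ts).1 ≤ fuel) := by
  induction fuel using Nat.strong_induction_on with
  | _ fuel IH =>
  have hgo : ∀ (N : Int) V r ts, (goA N fuel V r ts).1 ≤ fuel := by
    intro N V r ts
    cases ts with
    | nil => simp [goA]
    | cons t ts =>
      cases fuel with
      | zero => simp [goA]
      | succ f =>
        rw [goA]
        by_cases hc : PySem.Set.contains V t
        · simp only [if_pos hc]
          exact le_trans ((IH f (Nat.lt_succ_self f)).2 N V r ts) (Nat.le_succ f)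
        · simp only [if_neg hc]
          refine le_trans ((IH (min (recA N f V t).1 f)
            (Nat.lt_succ_of_le (min_le_right _ _))).2 N _ _ ts) ?_
          omega
  constructor
  · intro N V u
    cases fuel with
    | zero => simp [recA]
    | succ f =>
      rw [recA]
      exact le_trans ((IH f (Nat.lt_succ_self f)).2 N _ _ _) (Nat.le_succ f)
  · exact hgo

lemma loopB_zero (N : Int) (V : PySem.Set (List Char)) (stack : List (List Char)) :
    loopB N 0 V stack = V := by
  cases stack <;> rfl

lemma loopB_nil (N : Int) (f : Nat) (V : PySem.Set (List Char)) :
    loopB N f V [] = V := by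
  cases f <;> rfl

lemma loopB_succ (N : Int) (f : Nat) (V : PySem.Set (List Char)) (t : List Char)
    (rest : List (List Char)) :
    loopB N (f + 1) V (t :: rest)
      = if PySem.Set.contains V t then loopB N f V rest
        else match f with
          | 0 => PySem.Set.add V t
          | f' + 1 => loopB N f' (PySem.Set.add V t) (nbrsB t N ++ rest) := by
  cases f <;> rfl

-- simulation: the worklist loop tracks A's recursion exactly
lemma sim_goA (fuel : Nat) :
    ∀ (N : Int) V r ts stack g V' r', goA N fuel V r ts = (g, V', r') →
      loopB N fuel V (ts ++ stack) = loopB N g V' stack := by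
  induction fuel using Nat.strong_induction_on with
  | _ fuel IH =>
  intro N V r ts stack g V' r' h
  cases ts with
  | nil =>
    rw [goA] at h
    simp only [Prod.mk.injEq] at h
    obtain ⟨rfl, rfl, rfl⟩ := h
    simp
  | cons t ts =>
    cases fuel with
    | zero =>
      rw [goA] at h
      simp only [Prod.mk.injEq] at h
      obtain ⟨rfl, rfl, rfl⟩ := h
      rw [loopB_zero, loopB_zero]
    | succ f =>
      rw [goA] at h
      by_cases hc : PySem.Set.contains V t
      · rw [if_pos hc] at h
        rw [List.cons_append, loopB_succ, if_pos hc,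
          IH f (Nat.lt_succ_self f) N V r ts stack g V' r' h]
      · rw [if_neg hc] at h
        obtain ⟨g1, V1, r1, h1⟩ : ∃ g1 V1 r1, recA N f V t = (g1, V1, r1) := ⟨_, _, _, rfl⟩
        rw [h1] at h
        replace h : goA N (min g1 f) V1 (pyStrMax r r1) ts = (g, V', r') := h
        cases f with
        | zero =>
          rw [recA] at h1
          simp only [Prod.mk.injEq] at h1
          obtain ⟨rfl, rfl, rfl⟩ := h1
          simp only [Nat.min_self] at h
          rw [goA_zero] at h
          simp only [Prod.mk.injEq] at h
          obtain ⟨rfl, rfl, rfl⟩ := h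
          rw [List.cons_append, loopB_succ, if_neg hc, loopB_zero]
        | succ f' =>
          have hg1 : g1 ≤ f' + 1 := by
            have := (fuel_le (f' + 1)).1 N V t
            rw [h1] at this; exact this
          have hmin : min g1 (f' + 1) = g1 := min_eq_left hg1
          rw [hmin] at h
          rw [recA] at h1
          rw [List.cons_append, loopB_succ, if_neg hc, ← nbrsA_eq_nbrsB]
          show loopB N f' (PySem.Set.add V t) (nbrsA t N ++ (ts ++ stack))
              = loopB N g V' stack
          rw [IH f' (by omega) N (PySem.Set.add V t) t (nbrsA t N) (ts ++ stack) g1 V1 r1 h1,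
            IH g1 (by omega) N V1 (pyStrMax r r1) ts stack g V' r' h]

-- A's running maximum is the maximum of the newly visited elements
lemma maxinv (fuel : Nat) :
    (∀ (N : Int) V u g V' r', u ∉ V → recA N fuel V u = (g, V', r') →
        ∃ ex, V' = V ++ u :: ex ∧ r' = ex.foldl pyStrMax u)
    ∧ (∀ (N : Int) V r ts g V' r', goA N fuel V r ts = (g, V', r') →
        ∃ ex, V' = V ++ ex ∧ r' = ex.foldl pyStrMax r) := by
  induction fuel using Nat.strong_induction_on with
  | _ fuel IH =>
  have hgo : ∀ (N : Int) V r ts g V' r', goA N fuel V r ts = (g, V', r') →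
      ∃ ex, V' = V ++ ex ∧ r' = ex.foldl pyStrMax r := by
    intro N V r ts g V' r' h
    cases ts with
    | nil =>
      rw [goA] at h
      simp only [Prod.mk.injEq] at h
      obtain ⟨rfl, rfl, rfl⟩ := h
      exact ⟨[], by simp⟩
    | cons t ts =>
      cases fuel with
      | zero =>
        rw [goA] at h
        simp only [Prod.mk.injEq] at h
        obtain ⟨rfl, rfl, rfl⟩ := h
        exact ⟨[], by simp⟩
      | succ f =>
        rw [goA] at h
        by_cases hc : PySem.Set.contains V t
        · rw [if_pos hc] at h
          exact (IH f (Nat.lt_succ_self f)).2 N V r ts g V' r' h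
        · rw [if_neg hc] at h
          have htV : t ∉ V := fun hm => hc ((PySem.Set.contains_iff V t).mpr hm)
          obtain ⟨g1, V1, r1, h1⟩ : ∃ g1 V1 r1, recA N f V t = (g1, V1, r1) := ⟨_, _, _, rfl⟩
          rw [h1] at h
          replace h : goA N (min g1 f) V1 (pyStrMax r r1) ts = (g, V', r') := h
          obtain ⟨ex1, hV1, hr1⟩ := (IH f (Nat.lt_succ_self f)).1 N V t g1 V1 r1 htV h1
          obtain ⟨ex2, hV2, hr2⟩ :=
            (IH (min g1 f) (Nat.lt_succ_of_le (min_le_right _ _))).2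
              N V1 (pyStrMax r r1) ts g V' r' h
          refine ⟨t :: ex1 ++ ex2, ?_, ?_⟩
          · rw [hV2, hV1, List.append_assoc]
          · rw [hr2, hr1, foldl_pyStrMax_swap, List.foldl_append, List.foldl_cons]
  refine ⟨?_, hgo⟩
  intro N V u g V' r' hu h
  cases fuel with
  | zero =>
    rw [recA] at h
    simp only [Prod.mk.injEq] at h
    obtain ⟨rfl, rfl, rfl⟩ := h
    exact ⟨[], by rw [PySem.Set.add_of_not_mem hu]; simp⟩
  | succ f =>
    rw [recA] at h
    obtain ⟨ex2, hV2, hr2⟩ :=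
      (IH f (Nat.lt_succ_self f)).2 N (PySem.Set.add V u) u (nbrsA u N) g V' r' h
    exact ⟨ex2, by rw [hV2, PySem.Set.add_of_not_mem hu]; simp, hr2⟩

-- main bridge, for any fuel
lemma main_bridge (N : Int) (F : Nat) (u : List Char) :
    ∃ ex, loopB N (F + 1) PySem.Set.empty [u] = u :: ex
      ∧ (recA N F PySem.Set.empty u).2.2 = ex.foldl pyStrMax u := by
  have hnm : u ∉ PySem.Set.empty := by simp [PySem.Set.empty]
  have hc : ¬ PySem.Set.contains PySem.Set.empty u = true := fun hmem =>
    hnm ((PySem.Set.contains_iff _ u).mp hmem)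
  have hadd : PySem.Set.add PySem.Set.empty u = [u] := PySem.Set.add_of_not_mem hnm
  cases F with
  | zero =>
    refine ⟨[], ?_, ?_⟩
    · rw [show ([u] : List (List Char)) = u :: [] from rfl, loopB_succ, if_neg hc, hadd]
    · simp [recA]
  | succ F' =>
    have hrec : recA N (F' + 1) PySem.Set.empty u
        = goA N F' (PySem.Set.add PySem.Set.empty u) u (nbrsA u N) := by rw [recA]
    obtain ⟨g, V, r, hg⟩ :
        ∃ g V r, goA N F' (PySem.Set.add PySem.Set.empty u) u (nbrsA u N) = (g, V, r) :=
      ⟨_, _, _, rfl⟩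
    obtain ⟨ex, hV, hr⟩ := (maxinv F').2 N _ u (nbrsA u N) g V r hg
    refine ⟨ex, ?_, ?_⟩
    · rw [show ([u] : List (List Char)) = u :: [] from rfl, loopB_succ, if_neg hc,
        ← nbrsA_eq_nbrsB]
      show loopB N F' (PySem.Set.add PySem.Set.empty u) (nbrsA u N ++ []) = u :: ex
      rw [sim_goA F' N _ u (nbrsA u N) [] g V r hg, loopB_nil, hV, hadd]
      simp
    · rw [hrec, hg, hr]

-- ===== VERDICT (by name: the statement is the Claim_ definition above) =====
theorem makeLargestSpecial_spec : Claim_equal_makeLargestSpecial := by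
  intro s _
  unfold Spec_makeLargestSpecial makeLargestSpecial makeLargestSpecial_alt
  obtain ⟨ex, h1, h2⟩ := main_bridge (PySem.Str.len s)
    ((Nat.factorial s.toList.length + 1) * (s.toList.length + 2)) s.toList
  simp only []
  rw [h1, h2]
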